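-- pv_equiv track=rewrite | github.com/Michael-huo/ExpHub | scripts/_segment/policies/risk.py | _window_id_for_frame
-- ===== SOURCE A (Python) =====
-- def _window_id_for_frame(frame_idx, windows):
--     best_window_id = None
--     best_distance = None
--     best_rank = None
--     for item in list(windows or []):
--         start_idx = int(item.get("expanded_start_frame", item.get("raw_start_frame", 0)) or 0)
--         end_idx = int(item.get("expanded_end_frame", item.get("raw_end_frame", 0)) or 0)
--         if start_idx <= int(frame_idx) <= end_idx:
--             return int(item.get("window_id", 0) or 0)
--         if int(frame_idx) < start_idx:
--             distance = int(start_idx - int(frame_idx))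
--         else:
--             distance = int(int(frame_idx) - end_idx)
--         window_rank = int(item.get("window_rank", 0) or 0)
--         if best_distance is None or distance < best_distance or (
--             distance == best_distance and (best_rank is None or window_rank < best_rank)
--         ):
--             best_distance = int(distance)
--             best_rank = int(window_rank)
--             best_window_id = int(item.get("window_id", 0) or 0)
--     return best_window_id
-- ===== SOURCE B (Python) =====
-- def _window_id_for_frame(frame_idx, windows):
--     items = list(windows or [])
--     f = int(frame_idx)
--
--     def bounds(item):
--         s = int(item.get("expanded_start_frame", item.get("raw_start_frame", 0)) or 0)
--         e = int(item.get("expanded_end_frame", item.get("raw_end_frame", 0)) or 0)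
--         return s, e
--
--     # pass 1: first window that contains the frame
--     for item in items:
--         s, e = bounds(item)
--         if s <= f <= e:
--             return int(item.get("window_id", 0) or 0)
--
--     if not items:
--         return None
--
--     # no containing window: nearest window, ties broken by rank, then earliest
--     def key(item):
--         s, e = bounds(item)
--         d = s - f if f < s else f - e
--         return d, int(item.get("window_rank", 0) or 0)
--
--     best = min(items, key=key)
--     return int(best.get("window_id", 0) or 0)
-- ===== Notes on version B (the rewrite author's own statement) =====
-- stated objective: simpler
-- what changed: A's single loop with early return and three best-so-far variables (id, distance, rank, with None sentinels) is replaced by a containment pre-pass returning the first containing window, then an empty-list check, then min(items, key=(distance, rank)) whose first-minimum semantics reproduces A's tie-breaking.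
import Mathlib
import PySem

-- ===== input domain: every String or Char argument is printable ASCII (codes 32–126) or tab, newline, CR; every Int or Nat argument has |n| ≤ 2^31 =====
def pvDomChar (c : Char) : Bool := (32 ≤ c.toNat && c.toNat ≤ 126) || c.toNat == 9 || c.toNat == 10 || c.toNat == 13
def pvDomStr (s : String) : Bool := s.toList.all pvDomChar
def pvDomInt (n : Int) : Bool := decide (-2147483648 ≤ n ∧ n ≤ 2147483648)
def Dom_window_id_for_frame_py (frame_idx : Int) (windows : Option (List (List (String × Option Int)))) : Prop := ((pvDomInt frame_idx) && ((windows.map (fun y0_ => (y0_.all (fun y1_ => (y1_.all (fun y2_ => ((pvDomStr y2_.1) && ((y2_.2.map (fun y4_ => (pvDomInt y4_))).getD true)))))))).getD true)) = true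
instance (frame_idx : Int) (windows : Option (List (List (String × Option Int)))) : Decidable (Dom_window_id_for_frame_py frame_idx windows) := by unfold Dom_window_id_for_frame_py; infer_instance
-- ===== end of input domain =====

-- B replaces A's single loop carrying three best-so-far variables by a containment pre-pass
-- followed by a plain first-minimum over the (distance, rank) key; objective: simpler (same cost).

-- shared field-access helpers (both Pythons compute these exact expressions):
-- item.get(k, dflt) on the association list = value of the first matching key, else dflt
def pvGet (item : List (String × Option Int)) (k : String) : Option (Option Int) :=
  (item.find? (fun p => p.1 == k)).map (·.2)

-- int(item.get("expanded_start_frame", item.get("raw_start_frame", 0)) or 0)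
-- ('x or 0' maps None to 0 and leaves every int unchanged, since '0 or 0' is 0)
def pvStart (item : List (String × Option Int)) : Int :=
  ((pvGet item "expanded_start_frame").getD ((pvGet item "raw_start_frame").getD (some 0))).getD 0

def pvEnd (item : List (String × Option Int)) : Int :=
  ((pvGet item "expanded_end_frame").getD ((pvGet item "raw_end_frame").getD (some 0))).getD 0

-- int(item.get("window_id", 0) or 0)
def pvWid (item : List (String × Option Int)) : Int :=
  ((pvGet item "window_id").getD (some 0)).getD 0

-- int(item.get("window_rank", 0) or 0)
def pvRank (item : List (String × Option Int)) : Int :=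
  ((pvGet item "window_rank").getD (some 0)).getD 0

-- ===== PORT A =====
-- A's loop; the best_window_id/best_distance/best_rank variables (all None or all set
-- together in the Python) travel as one Option triple (id, distance, rank).
def pvALoop (f : Int) (items : List (List (String × Option Int)))
    (best : Option (Int × Int × Int)) : Option Int :=
  match items with
  | [] => best.map (fun b => b.1)
  | item :: rest =>
    let s := pvStart item
    let e := pvEnd item
    if s ≤ f ∧ f ≤ e then some (pvWid item)
    else
      let d := if f < s then s - f else f - e
      let r := pvRank item
      let best' :=
        match best with
        | none => some (pvWid item, d, r)
        | some (bw, bd, br) =>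
          if d < bd ∨ (d = bd ∧ r < br) then some (pvWid item, d, r) else some (bw, bd, br)
      pvALoop f rest best'

def window_id_for_frame_py (frame_idx : Int) (windows : Option (List (List (String × Option Int)))) : Option Int :=
  pvALoop frame_idx (windows.getD []) none

-- ===== PORT B =====
-- the (distance, window_rank) key of Source B
def pvKey (f : Int) (item : List (String × Option Int)) : Int × Int :=
  let s := pvStart item
  let e := pvEnd item
  ((if f < s then s - f else f - e), pvRank item)

-- Python's lexicographic tuple '<' on the two-int key
def pvLexLt (a b : Int × Int) : Bool :=
  decide (a.1 < b.1 ∨ (a.1 = b.1 ∧ a.2 < b.2))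

-- min(items, key=key): running first-minimum (keeps the earlier item on key ties)
def pvMinBy (f : Int) (b : List (String × Option Int)) :
    List (List (String × Option Int)) → List (String × Option Int)
  | [] => b
  | x :: rest => pvMinBy f (if pvLexLt (pvKey f x) (pvKey f b) then x else b) rest

def window_id_for_frame_py_alt (frame_idx : Int) (windows : Option (List (List (String × Option Int)))) : Option Int :=
  let items := windows.getD []
  match items.find? (fun item => decide (pvStart item ≤ frame_idx ∧ frame_idx ≤ pvEnd item)) with
  | some item => some (pvWid item)
  | none =>
    match items with
    | [] => none
    | x :: rest => some (pvWid (pvMinBy frame_idx x rest))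

-- ===== PRECONDITION & SPEC =====
def Spec_window_id_for_frame_py (frame_idx : Int) (windows : Option (List (List (String × Option Int)))) (out : Option Int) : Prop := out = window_id_for_frame_py_alt frame_idx windows
instance (frame_idx : Int) (windows : Option (List (List (String × Option Int)))) (out : Option Int) : Decidable (Spec_window_id_for_frame_py frame_idx windows out) := by unfold Spec_window_id_for_frame_py; infer_instance

-- ===== CLAIM (what is proved, stated in full; the proofs are below) =====
def Claim_equal_window_id_for_frame_py : Prop := ∀ (frame_idx : Int) (windows : Option (List (List (String × Option Int)))), Dom_window_id_for_frame_py frame_idx windows → Spec_window_id_for_frame_py frame_idx windows (window_id_for_frame_py frame_idx windows)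

-- ===== LEMMAS AND PROOFS =====

-- A's loop seeded with the (id, key) triple of a previous item b equals: id of the first
-- containing window if any, else id of the running first-minimum started at b.
theorem pvALoop_eq (f : Int) :
    ∀ (items : List (List (String × Option Int))) (b : List (String × Option Int)),
    pvALoop f items (some (pvWid b, pvKey f b)) =
      match items.find? (fun item => decide (pvStart item ≤ f ∧ f ≤ pvEnd item)) with
      | some it => some (pvWid it)
      | none => some (pvWid (pvMinBy f b items)) := by
  intro items
  induction items with
  | nil => intro b; simp [pvALoop, pvMinBy]
  | cons x rest ih =>
    intro b
    by_cases h : pvStart x ≤ f ∧ f ≤ pvEnd x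
    · simp [pvALoop, h, List.find?]
    · have hx : (fun item => decide (pvStart item ≤ f ∧ f ≤ pvEnd item)) x = false := by
        simp [h]
      rw [List.find?_cons_of_neg (by simp [hx])]
      have hbest : (if (if f < pvStart x then pvStart x - f else f - pvEnd x) < (pvKey f b).1 ∨
            ((if f < pvStart x then pvStart x - f else f - pvEnd x) = (pvKey f b).1 ∧
              pvRank x < (pvKey f b).2)
          then some (pvWid x, (if f < pvStart x then pvStart x - f else f - pvEnd x), pvRank x)
          else some (pvWid b, pvKey f b)) =
          some (pvWid (if pvLexLt (pvKey f x) (pvKey f b) then x else b),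
                pvKey f (if pvLexLt (pvKey f x) (pvKey f b) then x else b)) := by
        by_cases hP : ((if f < pvStart x then pvStart x - f else f - pvEnd x) < (pvKey f b).1 ∨
            ((if f < pvStart x then pvStart x - f else f - pvEnd x) = (pvKey f b).1 ∧
              pvRank x < (pvKey f b).2))
        · have hL : pvLexLt (pvKey f x) (pvKey f b) = true := by
            simp only [pvLexLt, decide_eq_true_eq]
            simpa [pvKey] using hP
          rw [if_pos hP, hL]
          simp [pvKey]
        · have hL : pvLexLt (pvKey f x) (pvKey f b) = false := by
            simp only [pvLexLt, decide_eq_false_iff_not]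
            simpa [pvKey] using hP
          rw [if_neg hP, hL]
          simp
      simp only [pvALoop, h, if_false]
      rw [hbest, ih, pvMinBy]

theorem window_id_for_frame_py_eq (frame_idx : Int)
    (windows : Option (List (List (String × Option Int)))) :
    window_id_for_frame_py frame_idx windows = window_id_for_frame_py_alt frame_idx windows := by
  simp only [window_id_for_frame_py, window_id_for_frame_py_alt]
  cases hw : windows.getD [] with
  | nil => simp [pvALoop]
  | cons x rest =>
    by_cases h : pvStart x ≤ frame_idx ∧ frame_idx ≤ pvEnd x
    · simp [pvALoop, h, List.find?]
    · have hx : (fun item => decide (pvStart item ≤ frame_idx ∧ frame_idx ≤ pvEnd item)) x = false := by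
        simp [h]
      rw [List.find?_cons_of_neg (by simp [hx])]
      simp only [pvALoop, h, if_false]
      have := pvALoop_eq frame_idx rest x
      simp only [pvKey] at this
      exact this

-- ===== VERDICT (by name: the statement is the Claim_ definition above) =====
theorem window_id_for_frame_py_spec : Claim_equal_window_id_for_frame_py := by
  intro frame_idx windows _
  unfold Spec_window_id_for_frame_py
  exact window_id_for_frame_py_eq frame_idx windows
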